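-- pv_equiv track=rewrite | github.com/liqcui/etcd-stress-tools | fio-benchmark/fio_benchmark_analyzer.py | _sanitize_llm_text
-- ===== SOURCE A (Python) =====
-- def _sanitize_llm_text(text: str) -> str:
--     """Clean up LLM output: unescape literal newlines/tabs, trim spaces, and collapse blank lines.
--
--     This makes the analysis easier to read in console and JSON reports by:
--     - Converting literal "\\n"/"\\t" to actual newlines/tabs
--     - Normalizing CRLF to LF
--     - Stripping leading/trailing whitespace per line
--     - Collapsing consecutive empty lines to at most one
--     """
--     if not text:
--         return ""
--
--     # Normalize newlines and unescape common sequences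
--     cleaned = text.replace("\r\n", "\n").replace("\r", "\n")
--     cleaned = cleaned.replace("\\n", "\n").replace("\\t", "\t").replace("\\r", "")
--
--     # Trim each line and collapse multiple blank lines
--     lines = [line.strip() for line in cleaned.split("\n")]
--     normalized_lines = []
--     previous_blank = False
--     for line in lines:
--         is_blank = (line == "")
--         if is_blank and previous_blank:
--             continue
--         normalized_lines.append(line)
--         previous_blank = is_blank
--
--     # Remove leading/trailing blank lines
--     while normalized_lines and normalized_lines[0] == "":
--         normalized_lines.pop(0)
--     while normalized_lines and normalized_lines[-1] == "":
--         normalized_lines.pop()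
--
--     return "\n".join(normalized_lines)
-- ===== SOURCE B (Python) =====
-- def _sanitize_llm_text(text: str) -> str:
--     # Paragraph-based rewrite: group consecutive non-blank stripped lines into
--     # paragraphs and join paragraphs with a single blank line; this replaces the
--     # previous_blank state machine and both pop loops.
--     cleaned = (text.replace("\r\n", "\n").replace("\r", "\n")
--                    .replace("\\n", "\n").replace("\\t", "\t").replace("\\r", ""))
--     paragraphs = []
--     current = []
--     for raw in cleaned.split("\n"):
--         line = raw.strip()
--         if line:
--             current.append(line)
--         elif current:
--             paragraphs.append(current)
--             current = []
--     if current: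
--         paragraphs.append(current)
--     return "\n\n".join("\n".join(p) for p in paragraphs)
-- ===== Notes on version B (the rewrite author's own statement) =====
-- stated objective: simpler
-- what changed: Replaces A's previous_blank state machine plus the two leading/trailing pop-loops with a single pass that groups consecutive non-blank stripped lines into paragraphs and joins the paragraphs with one blank line.
import Mathlib
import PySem

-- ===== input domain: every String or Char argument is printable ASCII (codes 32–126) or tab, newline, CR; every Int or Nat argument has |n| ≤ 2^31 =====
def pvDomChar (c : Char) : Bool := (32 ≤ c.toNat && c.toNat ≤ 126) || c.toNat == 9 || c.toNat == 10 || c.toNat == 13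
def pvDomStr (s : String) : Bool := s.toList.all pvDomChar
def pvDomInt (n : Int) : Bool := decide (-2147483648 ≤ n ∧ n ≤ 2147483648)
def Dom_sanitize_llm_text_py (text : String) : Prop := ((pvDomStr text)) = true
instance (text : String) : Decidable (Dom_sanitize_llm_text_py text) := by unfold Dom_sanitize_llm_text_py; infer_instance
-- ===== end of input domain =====

-- B rewrites A's previous_blank state machine and the two pop loops as a paragraph
-- grouping joined with single blank lines (objective: simpler decomposition, same cost).

-- ===== PORT A =====
-- body of A's "for line in lines" loop: state = (normalized_lines, previous_blank)
def pvStepA (st : List String × Bool) (line : String) : List String × Bool :=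
  if (line == "") && st.2 then st else (st.1 ++ [line], line == "")

-- while normalized_lines and normalized_lines[0] == "": normalized_lines.pop(0)
def pvPopFrontA (xs : List String) : List String :=
  match xs with
  | [] => []
  | l :: ls => if l == "" then pvPopFrontA ls else l :: ls

-- while normalized_lines and normalized_lines[-1] == "": normalized_lines.pop()
def pvPopBackA (xs : List String) : List String :=
  if h : PySem.List.pyGet? xs (-1) = some "" then pvPopBackA xs.dropLast else xs
termination_by xs.length
decreasing_by
  cases xs with
  | nil => simp [PySem.List.pyGet?, PySem.List.pyIdx?] at h
  | cons a as => simp [List.length_dropLast]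

def sanitize_llm_text_py (text : String) : String :=
  if text == "" then "" else
  let cleaned := PySem.Str.replace (PySem.Str.replace text "\r\n" "\n") "\r" "\n"
  let cleaned2 := PySem.Str.replace (PySem.Str.replace (PySem.Str.replace cleaned "\\n" "\n") "\\t" "\t") "\\r" ""
  -- sep "\n" is nonempty, so split? is always `some`; getD's default is never used
  let lines := ((PySem.Str.split? cleaned2 "\n").getD []).map PySem.Str.strip
  let st := lines.foldl pvStepA ([], false)
  PySem.Str.join "\n" (pvPopBackA (pvPopFrontA st.1))

-- ===== PORT B =====
-- body of B's loop: state = (paragraphs, current); takes the already-stripped line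
def pvStepB (st : List (List String) × List String) (line : String) : List (List String) × List String :=
  if line ≠ "" then (st.1, st.2 ++ [line])
  else if st.2 ≠ [] then (st.1 ++ [st.2], [])
  else st

def sanitize_llm_text_py_alt (text : String) : String :=
  let cleaned := PySem.Str.replace (PySem.Str.replace text "\r\n" "\n") "\r" "\n"
  let cleaned2 := PySem.Str.replace (PySem.Str.replace (PySem.Str.replace cleaned "\\n" "\n") "\\t" "\t") "\\r" ""
  -- sep "\n" is nonempty, so split? is always `some`; getD's default is never used
  let st := ((PySem.Str.split? cleaned2 "\n").getD []).foldl
      (fun st raw => pvStepB st (PySem.Str.strip raw)) ([], [])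
  let paras := if st.2 ≠ [] then st.1 ++ [st.2] else st.1
  PySem.Str.join "\n\n" (paras.map (PySem.Str.join "\n"))

-- ===== PRECONDITION & SPEC =====
def Spec_sanitize_llm_text_py (text : String) (out : String) : Prop := out = sanitize_llm_text_py_alt text
instance (text : String) (out : String) : Decidable (Spec_sanitize_llm_text_py text out) := by unfold Spec_sanitize_llm_text_py; infer_instance

-- ===== CLAIM (what is proved, stated in full; the proofs are below) =====
def Claim_equal_sanitize_llm_text_py : Prop := ∀ (text : String), Dom_sanitize_llm_text_py text → Spec_sanitize_llm_text_py text (sanitize_llm_text_py text)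

-- ===== LEMMAS AND PROOFS =====

-- A's collapse loop, as the list it still emits from state `prev`
def pvCollapse : List String → Bool → List String
  | [], _ => []
  | l :: ls, prev => if (l == "") && prev then pvCollapse ls prev else l :: pvCollapse ls (l == "")

-- B's paragraph loop (including the final flush), as the paragraphs it still emits from state `cur`
def pvParas : List String → List String → List (List String)
  | [], cur => if cur = [] then [] else [cur]
  | l :: ls, cur => if l ≠ "" then pvParas ls (cur ++ [l]) else if cur ≠ [] then cur :: pvParas ls [] else pvParas ls []

-- drop trailing blank lines
def pvRdrop (xs : List String) : List String := (xs.reverse.dropWhile (· == "")).reverse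

-- paragraphs interleaved with single blank lines
def pvInterB : List (List String) → List String
  | [] => []
  | [p] => p
  | p :: q :: r => p ++ "" :: pvInterB (q :: r)

theorem pvFL (xs : List String) (acc : List String) (prev : Bool) :
    (xs.foldl pvStepA (acc, prev)).1 = acc ++ pvCollapse xs prev := by
  induction xs generalizing acc prev with
  | nil => simp [pvCollapse]
  | cons l ls ih =>
    rw [List.foldl_cons]
    by_cases h : ((l == "") && prev) = true
    · have hs : pvStepA (acc, prev) l = (acc, prev) := by simp [pvStepA, h]
      rw [hs, ih]
      simp [pvCollapse, h]
    · have hs : pvStepA (acc, prev) l = (acc ++ [l], l == "") := by simp [pvStepA, h]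
      rw [hs, ih]
      simp [pvCollapse, h]

theorem pvGL (xs : List String) (paras : List (List String)) (cur : List String) :
    (if (xs.foldl pvStepB (paras, cur)).2 ≠ [] then
        (xs.foldl pvStepB (paras, cur)).1 ++ [(xs.foldl pvStepB (paras, cur)).2]
      else (xs.foldl pvStepB (paras, cur)).1)
    = paras ++ pvParas xs cur := by
  induction xs generalizing paras cur with
  | nil => by_cases h : cur = [] <;> simp [pvParas, h]
  | cons l ls ih =>
    simp only [List.foldl_cons]
    by_cases h : l = ""
    · subst h
      by_cases hc : cur = []
      · have hs : pvStepB (paras, cur) "" = (paras, cur) := by simp [pvStepB, hc]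
        rw [hs, ih]
        simp [pvParas, hc]
      · have hs : pvStepB (paras, cur) "" = (paras ++ [cur], []) := by simp [pvStepB, hc]
        rw [hs, ih]
        simp [pvParas, hc]
    · have hs : pvStepB (paras, cur) l = (paras, cur ++ [l]) := by simp [pvStepB, h]
      rw [hs, ih]
      simp [pvParas, h]

theorem pvPB (xs : List String) : pvPopBackA xs = pvRdrop xs := by
  induction xs using List.reverseRecOn with
  | nil => rw [pvPopBackA]; simp [PySem.List.pyGet?, PySem.List.pyIdx?, pvRdrop]
  | append_singleton ys l ih =>
    rw [pvPopBackA]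
    by_cases h : l = ""
    · subst h
      rw [dif_pos (by simp [PySem.List.pyGet?_neg_one_append_singleton]), List.dropLast_concat, ih]
      simp [pvRdrop]
    · rw [dif_neg (by simp [PySem.List.pyGet?_neg_one_append_singleton, h])]
      simp [pvRdrop, h]

theorem pvP1 (x : String) (ys : List String) (hx : x ≠ "") :
    pvRdrop (x :: ys) = x :: pvRdrop ys := by
  simp only [pvRdrop]
  rw [show (x :: ys).reverse = ys.reverse ++ [x] by simp]
  rw [List.dropWhile_append]
  by_cases h : (ys.reverse.dropWhile (· == "")).isEmpty = true
  · have h' := List.isEmpty_iff.mp h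
    rw [if_pos h]
    simp [hx, h']
  · rw [if_neg h]
    simp [List.reverse_append]

theorem pvP2 (ys : List String) :
    pvRdrop ("" :: ys) = if pvRdrop ys = [] then [] else "" :: pvRdrop ys := by
  simp only [pvRdrop]
  rw [show ("" :: ys).reverse = ys.reverse ++ [""] by simp]
  rw [List.dropWhile_append]
  by_cases h : (ys.reverse.dropWhile (· == "")).isEmpty = true
  · have h' := List.isEmpty_iff.mp h
    rw [if_pos h]
    simp [h']
  · rw [if_neg h]
    have h' : ys.reverse.dropWhile (· == "") ≠ [] := by simpa [List.isEmpty_iff] using h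
    simp [h', List.reverse_append]

theorem pvA1 (xs : List String) : pvPopFrontA (pvCollapse xs true) = pvCollapse xs true := by
  induction xs with
  | nil => simp [pvCollapse, pvPopFrontA]
  | cons l ls ih =>
    by_cases h : l = ""
    · subst h; simpa [pvCollapse] using ih
    · simp [pvCollapse, pvPopFrontA, h]

theorem pvPF (xs : List String) : pvPopFrontA (pvCollapse xs false) = pvCollapse xs true := by
  cases xs with
  | nil => simp [pvCollapse, pvPopFrontA]
  | cons l ls =>
    by_cases h : l = ""
    · subst h; simpa [pvCollapse, pvPopFrontA] using pvA1 ls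
    · simp [pvCollapse, pvPopFrontA, h]

theorem pvNE (xs : List String) (cur : List String) :
    ∀ p ∈ pvParas xs cur, p ≠ [] := by
  induction xs generalizing cur with
  | nil =>
    intro p hp
    by_cases h : cur = []
    · simp [pvParas, h] at hp
    · simp [pvParas, h] at hp
      exact hp ▸ h
  | cons l ls ih =>
    intro p hp
    by_cases h : l = ""
    · subst h
      by_cases hc : cur = []
      · exact ih [] p (by simpa [pvParas, hc] using hp)
      · rcases (by simpa [pvParas, hc] using hp : p = cur ∨ p ∈ pvParas ls []) with h1 | h1
        · simp [h1, hc]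
        · exact ih [] p h1
    · exact ih (cur ++ [l]) p (by simpa [pvParas, h] using hp)

theorem pvInterB_ne (P : List (List String)) (hne : ∀ p ∈ P, p ≠ []) (hP : P ≠ []) :
    pvInterB P ≠ [] := by
  match P with
  | [] => exact absurd rfl hP
  | [p] => simpa [pvInterB] using hne p (by simp)
  | p :: q :: r =>
    have hp : p ≠ [] := hne p (by simp)
    simp [pvInterB]

theorem pvMG (xs : List String) :
    pvRdrop (pvCollapse xs true) = pvInterB (pvParas xs [])
    ∧ ∀ cur : List String, cur ≠ [] →
        pvInterB (pvParas xs cur) = cur ++ pvRdrop (pvCollapse xs false) := by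
  induction xs with
  | nil =>
    constructor
    · simp [pvCollapse, pvParas, pvRdrop, pvInterB]
    · intro cur hc; simp [pvCollapse, pvParas, pvRdrop, pvInterB, hc]
  | cons x xs ih =>
    obtain ⟨ihM, ihG⟩ := ih
    by_cases h : x = ""
    · subst h
      constructor
      · simpa [pvCollapse, pvParas] using ihM
      · intro cur hc
        have hcol : pvCollapse ("" :: xs) false = "" :: pvCollapse xs true := by
          simp [pvCollapse]
        rw [hcol, pvP2]
        have hpar : pvParas ("" :: xs) cur = cur :: pvParas xs [] := by
          simp [pvParas, hc]
        rw [hpar]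
        cases hP : pvParas xs [] with
        | nil =>
          have hz : pvRdrop (pvCollapse xs true) = [] := by rw [ihM, hP]; rfl
          simp [pvInterB, hz]
        | cons q r =>
          have hq : pvInterB (q :: r) ≠ [] := by
            apply pvInterB_ne
            · intro p hp; exact pvNE xs [] p (hP ▸ hp)
            · simp
          have hv : pvRdrop (pvCollapse xs true) = pvInterB (q :: r) := by rw [ihM, hP]
          rw [hv, if_neg hq]
          simp [pvInterB]
    · have hb : (x == "") = false := by simp [h]
      constructor
      · have hcol : pvCollapse (x :: xs) true = x :: pvCollapse xs false := by
          simp [pvCollapse, hb]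
        rw [hcol, pvP1 x _ h]
        have hp : pvParas (x :: xs) [] = pvParas xs [x] := by simp [pvParas, h]
        rw [hp, ihG [x] (by simp), List.singleton_append]
      · intro cur hc
        have hcol : pvCollapse (x :: xs) false = x :: pvCollapse xs false := by
          simp [pvCollapse, hb]
        rw [hcol, pvP1 x _ h]
        have hp : pvParas (x :: xs) cur = pvParas xs (cur ++ [x]) := by simp [pvParas, h]
        rw [hp, ihG (cur ++ [x]) (by simp), List.append_assoc, List.singleton_append]

theorem pvJnil (sep : String) : PySem.Str.join sep [] = "" := by
  simp [PySem.Str.join, PySem.Chars.join_nil]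

theorem pvJsingle (sep a : String) : PySem.Str.join sep [a] = a := by
  simp [PySem.Str.join, PySem.Chars.join_singleton]

theorem pvJcons2 (sep a b : String) (r : List String) :
    PySem.Str.join sep (a :: b :: r) = a ++ sep ++ PySem.Str.join sep (b :: r) := by
  simp only [PySem.Str.join, List.map_cons, PySem.Chars.join_cons_cons, String.ofList_append]
  simp

theorem pvJapp (sep : String) (xs ys : List String) (hx : xs ≠ []) (hy : ys ≠ []) :
    PySem.Str.join sep (xs ++ ys) = PySem.Str.join sep xs ++ sep ++ PySem.Str.join sep ys := by
  induction xs with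
  | nil => exact absurd rfl hx
  | cons a xs ih =>
    cases xs with
    | nil =>
      cases ys with
      | nil => exact absurd rfl hy
      | cons b r => simp [pvJcons2, pvJsingle]
    | cons a' xs' =>
      rw [List.cons_append, List.cons_append, pvJcons2, ← List.cons_append,
        ih (by simp), pvJcons2]
      simp [String.append_assoc]

theorem pvJ (P : List (List String)) (hne : ∀ p ∈ P, p ≠ []) :
    PySem.Str.join "\n" (pvInterB P) = PySem.Str.join "\n\n" (P.map (PySem.Str.join "\n")) := by
  match P with
  | [] => simp [pvInterB, pvJnil]
  | [p] => simp [pvInterB, pvJsingle]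
  | p :: q :: r =>
    have hp : p ≠ [] := hne p (by simp)
    have hrest : pvInterB (q :: r) ≠ [] := by
      apply pvInterB_ne
      · intro a ha; exact hne a (by simp [ha])
      · simp
    have ih := pvJ (q :: r) (fun a ha => hne a (by simp [ha]))
    rw [show pvInterB (p :: q :: r) = p ++ "" :: pvInterB (q :: r) from rfl]
    rw [pvJapp "\n" p ("" :: pvInterB (q :: r)) hp (by simp)]
    obtain ⟨b, rest, hbr⟩ := List.exists_cons_of_ne_nil hrest
    rw [hbr, pvJcons2, ← hbr, ih]
    simp only [List.map_cons]
    rw [pvJcons2]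
    rw [show ("" : String) ++ "\n" = "\n" from String.empty_append]
    rw [← String.append_assoc]
    congr 1
    rw [String.append_assoc]
    congr 1

theorem pvSplitSome (s : String) : ∃ L, PySem.Str.split? s "\n" = some L := by
  simp [PySem.Str.split?, PySem.Chars.split?]

theorem pvAltEmpty : sanitize_llm_text_py_alt "" = "" := by decide

-- ===== VERDICT (by name: the statement is the Claim_ definition above) =====
theorem sanitize_llm_text_py_spec : Claim_equal_sanitize_llm_text_py := by
  intro text _
  unfold Spec_sanitize_llm_text_py
  by_cases h : text = ""
  · subst h
    simp [sanitize_llm_text_py, pvAltEmpty]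
  · obtain ⟨L, hL⟩ := pvSplitSome (PySem.Str.replace (PySem.Str.replace (PySem.Str.replace (PySem.Str.replace (PySem.Str.replace text "\r\n" "\n") "\r" "\n") "\\n" "\n") "\\t" "\t") "\\r" "")
    simp only [sanitize_llm_text_py, sanitize_llm_text_py_alt, beq_iff_eq, if_neg h, hL,
      Option.getD_some]
    rw [← List.foldl_map (f := PySem.Str.strip) (g := pvStepB)]
    rw [pvFL, List.nil_append, pvPF, pvPB, (pvMG (L.map PySem.Str.strip)).1]
    rw [pvGL (L.map PySem.Str.strip) [] [], List.nil_append]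
    exact pvJ _ (pvNE (L.map PySem.Str.strip) [])
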